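-- pv_equiv track=rewrite | github.com/eronekogin/leetcode | 2023/check_if_word_can_be_placed_in_crossword.py | place_word_in_crossword
-- ===== SOURCE A (Python) =====
-- def place_word_in_crossword(board: list[list[str]], word: str) -> bool:
--     """
--     * Find word in column means to rotate the board and check the rows in the rotated board.
--     * Find word right to left means to find a reversed word from left to right.
--     """
--     words = [word, word[::-1]]
--     n = len(word)
--     for row in board + list(zip(*board)):
--         candidates = ''.join(row).split('#')
--         for w in words:
--             for candidate in candidates:
--                 if (
--                     len(candidate) == n and
--                     all(
--                         candidate[i] == w[i] or candidate[i] == ' '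
--                         for i in range(n)
--                     )
--                 ):
--                     return True
--
--     return False
-- ===== SOURCE B (Python) =====
-- def place_word_in_crossword(board: list[list[str]], word: str) -> bool:
--     """Single-pass state machine over each line (rows, then columns as zip
--     truncates them): track segment length and two running match flags instead
--     of building segment strings."""
--     n = len(word)
--
--     def scan(cells):
--         seg_len, fwd, rev = 0, True, True
--         for cell in cells:
--             for c in cell:
--                 if c == '#':
--                     if seg_len == n and (fwd or rev):
--                         return True
--                     seg_len, fwd, rev = 0, True, True
--                 else:
--                     if seg_len < n:
--                         fwd = fwd and (c == word[seg_len] or c == ' ')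
--                         rev = rev and (c == word[n - 1 - seg_len] or c == ' ')
--                     seg_len += 1
--         return seg_len == n and (fwd or rev)
--
--     for row in board:
--         if scan(row):
--             return True
--     m = min((len(r) for r in board), default=0)
--     for j in range(m):
--         if scan(r[j] for r in board):
--             return True
--     return False
-- ===== Notes on version B (the rewrite author's own statement) =====
-- stated objective: alternative
-- what changed: Replaces join-then-split('#') segment strings checked by all()-comprehensions with a single character-by-character pass per line that keeps the current segment length and two running forward/backward match flags, closing the segment at each '#' or end of line.
import Mathlib
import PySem

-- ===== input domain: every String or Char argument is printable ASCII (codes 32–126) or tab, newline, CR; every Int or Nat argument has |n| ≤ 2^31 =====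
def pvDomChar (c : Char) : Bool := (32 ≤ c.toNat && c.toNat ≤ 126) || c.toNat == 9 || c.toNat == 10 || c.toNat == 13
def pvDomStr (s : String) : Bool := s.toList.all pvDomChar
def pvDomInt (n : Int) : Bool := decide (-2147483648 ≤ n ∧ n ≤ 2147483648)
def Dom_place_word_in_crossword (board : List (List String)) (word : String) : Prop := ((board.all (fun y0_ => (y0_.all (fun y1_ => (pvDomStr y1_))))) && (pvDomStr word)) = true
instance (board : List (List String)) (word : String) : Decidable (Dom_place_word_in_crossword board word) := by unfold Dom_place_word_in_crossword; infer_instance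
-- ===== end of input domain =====

-- B replaces A's join-then-split('#') segment strings with a single per-line scan
-- keeping the segment length and two running match flags (alternative decomposition;
-- no speed claim). Equivalence of the return value is proved on the whole domain.

-- ===== PORT A =====
-- list(zip(*board)): columns up to the shortest row (empty when board is empty)
def pyZipStar (rows : List (List String)) : List (List String) :=
  match rows with
  | [] => []
  | r :: rs =>
      (List.range (rs.foldl (fun m l => min m l.length) r.length)).map
        (fun j => (r :: rs).map (fun row => row.getD j ""))

def place_word_in_crossword (board : List (List String)) (word : String) : Bool :=
  let w := word.toList
  let words : List (List Char) := [w, w.reverse]  -- word[::-1] (PySem slice?_none_none_neg_one)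
  let n := w.length
  (board ++ pyZipStar board).any fun row =>
    let candidates := PySem.Chars.splitOn (PySem.Chars.join [] (row.map String.toList)) ['#']
    words.any fun wd => candidates.any fun candidate =>
      candidate.length == n &&
        ((List.range n).all fun i =>
          (PySem.List.pyGetD candidate (i : Int) ' ' == PySem.List.pyGetD wd (i : Int) ' ')
          || (PySem.List.pyGetD candidate (i : Int) ' ' == ' '))

-- ===== PORT B =====
-- state: (found, seg_len, fwd, rev)
def pvStepB (n : Nat) (w : List Char) :
    Bool × Nat × Bool × Bool → Char → Bool × Nat × Bool × Bool
  | (found, segLen, fwd, rev), c =>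
    if c = '#' then
      (found || ((segLen == n) && (fwd || rev)), 0, true, true)
    else if segLen < n then
      (found, segLen + 1,
        fwd && ((c == PySem.List.pyGetD w (segLen : Int) ' ') || (c == ' ')),
        rev && ((c == PySem.List.pyGetD w ((n : Int) - 1 - segLen) ' ') || (c == ' ')))
    else (found, segLen + 1, fwd, rev)

def pvScanB (n : Nat) (w : List Char) (cells : List (List Char)) : Bool :=
  let st := cells.foldl (fun st cell => cell.foldl (pvStepB n w) st) (false, 0, true, true)
  st.1 || ((st.2.1 == n) && (st.2.2.1 || st.2.2.2))

def place_word_in_crossword_alt (board : List (List String)) (word : String) : Bool :=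
  let w := word.toList
  let n := w.length
  (board.any fun row => pvScanB n w (row.map String.toList))
  || (let m := match board with
       | [] => 0
       | r :: rs => rs.foldl (fun m l => min m l.length) r.length
      (List.range m).any fun j =>
        pvScanB n w (board.map fun r => (r.getD j "").toList))

-- ===== PRECONDITION & SPEC =====
def Spec_place_word_in_crossword (board : List (List String)) (word : String) (out : Bool) : Prop := out = place_word_in_crossword_alt board word
instance (board : List (List String)) (word : String) (out : Bool) : Decidable (Spec_place_word_in_crossword board word out) := by unfold Spec_place_word_in_crossword; infer_instance

-- ===== CLAIM (what is proved, stated in full; the proofs are below) =====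
def Claim_equal_place_word_in_crossword : Prop := ∀ (board : List (List String)) (word : String), Dom_place_word_in_crossword board word → Spec_place_word_in_crossword board word (place_word_in_crossword board word)

-- ===== LEMMAS AND PROOFS =====

-- segment splitter on '#', the value PySem.Chars.splitOn computes for sep = "#"
def pvSplitHash : List Char → List Char → List (List Char)
  | p, [] => [p]
  | p, c :: rest => if c = '#' then p :: pvSplitHash [] rest else pvSplitHash (p ++ [c]) rest

theorem pvSplitHash_go (fuel : Nat) (l cur : List Char) (acc : List (List Char))
    (h : l.length < fuel) :
    PySem.Chars.splitOn.go ['#'] fuel l cur acc = acc.reverse ++ pvSplitHash cur.reverse l := by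
  induction fuel generalizing l cur acc with
  | zero => omega
  | succ fuel ih =>
    cases l with
    | nil => simp [PySem.Chars.splitOn.go, pvSplitHash]
    | cons c rest =>
      by_cases hc : c = '#'
      · subst hc
        rw [show PySem.Chars.splitOn.go ['#'] (fuel+1) ('#'::rest) cur acc
              = PySem.Chars.splitOn.go ['#'] fuel rest [] (cur.reverse :: acc) by
            simp [PySem.Chars.splitOn.go, List.isPrefixOf]]
        rw [ih rest [] (cur.reverse :: acc) (by simpa using Nat.lt_of_succ_lt_succ h)]
        simp [pvSplitHash]
      · rw [show PySem.Chars.splitOn.go ['#'] (fuel+1) (c::rest) cur acc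
              = PySem.Chars.splitOn.go ['#'] fuel rest (c :: cur) acc by
            simp [PySem.Chars.splitOn.go, List.isPrefixOf, Ne.symm hc]]
        rw [ih rest (c :: cur) acc (by simpa using Nat.lt_of_succ_lt_succ h)]
        simp [pvSplitHash, hc]

theorem pvSplitOn_hash (cs : List Char) :
    PySem.Chars.splitOn cs ['#'] = pvSplitHash [] cs := by
  unfold PySem.Chars.splitOn
  rw [pvSplitHash_go (cs.length + 1) cs [] [] (by omega)]
  simp

theorem pvJoin_nil (l : List (List Char)) : PySem.Chars.join [] l = l.flatten := by
  unfold PySem.Chars.join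
  induction l with
  | nil => simp [List.intercalate]
  | cons a t ih =>
    cases t with
    | nil => simp [List.intercalate]
    | cons b t' =>
      simp [List.intercalate, List.intersperse] at ih ⊢
      simpa using ih


def pvMatch (w : List Char) (n : Nat) (cand : List Char) : Bool :=
  (cand.length == n) && ((List.range n).all fun i =>
    (cand.getD i ' ' == w.getD i ' ') || (cand.getD i ' ' == ' '))

def pvOK (w : List Char) (n : Nat) (cand : List Char) : Bool :=
  pvMatch w n cand || pvMatch w.reverse n cand

def pvFwd (w : List Char) (n : Nat) (p : List Char) : Bool :=
  (List.range (min p.length n)).all fun i =>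
    (p.getD i ' ' == w.getD i ' ') || (p.getD i ' ' == ' ')

def pvRev (w : List Char) (n : Nat) (p : List Char) : Bool :=
  (List.range (min p.length n)).all fun i =>
    (p.getD i ' ' == w.getD (n - 1 - i) ' ') || (p.getD i ' ' == ' ')

theorem pvFwd_nil (w : List Char) (n : Nat) : pvFwd w n [] = true := by
  simp [pvFwd]

theorem pvRev_nil (w : List Char) (n : Nat) : pvRev w n [] = true := by
  simp [pvRev]

theorem pvAllRange_congr (n : Nat) (f g : Nat → Bool) (h : ∀ i < n, f i = g i) :
    (List.range n).all f = (List.range n).all g := by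
  rw [Bool.eq_iff_iff]
  simp only [List.all_eq_true, List.mem_range]
  exact ⟨fun H i hi => (h i hi) ▸ H i hi, fun H i hi => (h i hi).symm ▸ H i hi⟩

theorem pvFwd_snoc (w : List Char) (n : Nat) (p : List Char) (c : Char) :
    pvFwd w n (p ++ [c]) =
      if p.length < n then pvFwd w n p && ((c == w.getD p.length ' ') || (c == ' '))
      else pvFwd w n p := by
  by_cases h : p.length < n
  · have hmin : min (p ++ [c]).length n = p.length + 1 := by simp; omega
    have hmin' : min p.length n = p.length := by omega
    rw [if_pos h]
    unfold pvFwd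
    rw [hmin, hmin', List.range_succ, List.all_append]
    congr 1
    · exact pvAllRange_congr _ _ _ fun i hi => by rw [List.getD_append _ _ _ _ hi]
    · simp
  · have hmin : min (p ++ [c]).length n = min p.length n := by simp; omega
    rw [if_neg h]
    unfold pvFwd
    rw [hmin]
    exact pvAllRange_congr _ _ _ fun i hi =>
      by rw [List.getD_append _ _ _ _ (by omega)]

theorem pvRev_snoc (w : List Char) (n : Nat) (p : List Char) (c : Char) :
    pvRev w n (p ++ [c]) =
      if p.length < n then pvRev w n p && ((c == w.getD (n - 1 - p.length) ' ') || (c == ' '))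
      else pvRev w n p := by
  by_cases h : p.length < n
  · have hmin : min (p ++ [c]).length n = p.length + 1 := by simp; omega
    have hmin' : min p.length n = p.length := by omega
    rw [if_pos h]
    unfold pvRev
    rw [hmin, hmin', List.range_succ, List.all_append]
    congr 1
    · exact pvAllRange_congr _ _ _ fun i hi => by rw [List.getD_append _ _ _ _ hi]
    · simp
  · have hmin : min (p ++ [c]).length n = min p.length n := by simp; omega
    rw [if_neg h]
    unfold pvRev
    rw [hmin]
    exact pvAllRange_congr _ _ _ fun i hi =>
      by rw [List.getD_append _ _ _ _ (by omega)]

theorem pvClose (w : List Char) (n : Nat) (hn : n = w.length) (p : List Char) :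
    ((p.length == n) && (pvFwd w n p || pvRev w n p)) = pvOK w n p := by
  by_cases hp : p.length = n
  · have hmin : min p.length n = n := by omega
    unfold pvOK pvMatch pvFwd pvRev
    rw [hmin]
    have hrev : ((List.range n).all fun i =>
        (p.getD i ' ' == w.getD (n - 1 - i) ' ') || (p.getD i ' ' == ' '))
        = ((List.range n).all fun i =>
        (p.getD i ' ' == w.reverse.getD i ' ') || (p.getD i ' ' == ' ')) := by
      refine pvAllRange_congr _ _ _ fun i hi => ?_
      have h1 : w.reverse.getD i ' ' = w.getD (n - 1 - i) ' ' := by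
        rw [List.getD_eq_getElem _ _ (by simp; omega),
            List.getD_eq_getElem _ _ (by omega)]
        rw [List.getElem_reverse]
        simp [hn.symm]
      rw [h1]
    rw [hrev]
    simp [hp, Bool.and_or_distrib_left]
  · have hb : (p.length == n) = false := by simp [hp]
    simp [pvOK, pvMatch, hb]

theorem pvStep_spec (w : List Char) (n : Nat) (hn : n = w.length)
    (found : Bool) (p : List Char) (c : Char) :
    pvStepB n w (found, p.length, pvFwd w n p, pvRev w n p) c =
      if c = '#' then (found || pvOK w n p, ([] : List Char).length, pvFwd w n [], pvRev w n [])
      else (found, (p ++ [c]).length, pvFwd w n (p ++ [c]), pvRev w n (p ++ [c])) := by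
  show (if c = '#' then _ else _) = _
  by_cases hc : c = '#'
  · rw [if_pos hc, if_pos hc, pvClose w n hn p]
    simp [pvFwd_nil, pvRev_nil]
  · rw [if_neg hc, if_neg hc, pvFwd_snoc, pvRev_snoc]
    by_cases h : p.length < n
    · rw [if_pos h, if_pos h, if_pos h]
      have hcast : (n : Int) - 1 - (p.length : Int) = ((n - 1 - p.length : Nat) : Int) := by
        omega
      simp only [hcast, PySem.List.pyGetD_natCast]
      simp
    · rw [if_neg h, if_neg h, if_neg h]
      simp

theorem pvScan_go (w : List Char) (n : Nat) (hn : n = w.length) (cs : List Char)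
    (found : Bool) (p : List Char) :
    (let st := cs.foldl (pvStepB n w) (found, p.length, pvFwd w n p, pvRev w n p)
     st.1 || ((st.2.1 == n) && (st.2.2.1 || st.2.2.2)))
    = (found || (pvSplitHash p cs).any (pvOK w n)) := by
  induction cs generalizing found p with
  | nil =>
    simp only [List.foldl_nil, pvSplitHash, List.any_cons, List.any_nil, Bool.or_false]
    rw [pvClose w n hn p]
  | cons c cs ih =>
    rw [List.foldl_cons, pvStep_spec w n hn found p c]
    by_cases hc : c = '#'
    · rw [if_pos hc, ih]
      subst hc
      simp [pvSplitHash, Bool.or_assoc]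
    · rw [if_neg hc, ih]
      simp only [pvSplitHash, if_neg hc]

theorem pvScanB_eq (w : List Char) (cells : List (List Char)) :
    pvScanB w.length w cells = (pvSplitHash [] cells.flatten).any (pvOK w w.length) := by
  unfold pvScanB
  have hfold : cells.foldl (fun st cell => cell.foldl (pvStepB w.length w) st)
      (false, 0, true, true)
      = cells.flatten.foldl (pvStepB w.length w) (false, 0, true, true) :=
    (List.foldl_flatten).symm
  simp only [hfold]
  have h0 : ((false : Bool), (0 : Nat), (true : Bool), (true : Bool))
      = (false, ([] : List Char).length, pvFwd w w.length [], pvRev w w.length []) := by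
    simp [pvFwd_nil, pvRev_nil]
  rw [h0]
  simpa using pvScan_go w w.length rfl cells.flatten false []

theorem pvAny_or {a : Type} (l : List a) (f g : a → Bool) :
    (l.any fun x => f x || g x) = (l.any f || l.any g) := by
  induction l with
  | nil => simp
  | cons x t ih =>
    simp only [List.any_cons, ih]
    cases f x <;> cases g x <;> simp

theorem pvLineA_eq (w : List Char) (row : List (List Char)) :
    ([w, w.reverse].any fun wd =>
      (PySem.Chars.splitOn (PySem.Chars.join [] row) ['#']).any fun candidate =>
        candidate.length == w.length &&
          ((List.range w.length).all fun i =>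
            (PySem.List.pyGetD candidate (i : Int) ' ' == PySem.List.pyGetD wd (i : Int) ' ')
            || (PySem.List.pyGetD candidate (i : Int) ' ' == ' ')))
    = pvScanB w.length w row := by
  rw [pvScanB_eq, pvJoin_nil, pvSplitOn_hash]
  simp only [List.any_cons, List.any_nil, Bool.or_false]
  rw [show (pvSplitHash [] row.flatten).any (pvOK w w.length)
        = ((pvSplitHash [] row.flatten).any (pvMatch w w.length)
          || (pvSplitHash [] row.flatten).any (pvMatch w.reverse w.length)) from by
    rw [← pvAny_or]; rfl]
  congr 1 <;>
  · refine List.any_congr rfl fun cand => ?_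
    simp [pvMatch, PySem.List.pyGetD_natCast, List.getD_eq_getElem?_getD]

theorem pvCols_eq (w : List Char) (board : List (List String)) :
    ((pyZipStar board).any fun row =>
      ([w, w.reverse].any fun wd =>
        (PySem.Chars.splitOn (PySem.Chars.join [] (row.map String.toList)) ['#']).any
          fun candidate =>
            candidate.length == w.length &&
              ((List.range w.length).all fun i =>
                (PySem.List.pyGetD candidate (i : Int) ' ' == PySem.List.pyGetD wd (i : Int) ' ')
                || (PySem.List.pyGetD candidate (i : Int) ' ' == ' '))))
    = ((List.range (match board with
        | [] => 0
        | r :: rs => rs.foldl (fun m l => min m l.length) r.length)).any fun j =>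
        pvScanB w.length w (board.map fun r => (r.getD j "").toList)) := by
  cases board with
  | nil => simp [pyZipStar]
  | cons r rs =>
    unfold pyZipStar
    rw [List.any_map]
    refine List.any_congr rfl fun j => ?_
    dsimp only [Function.comp]
    rw [pvLineA_eq w (((r :: rs).map fun row => row.getD j "").map String.toList)]
    rw [List.map_map]
    rfl

-- ===== VERDICT (by name: the statement is the Claim_ definition above) =====
theorem place_word_in_crossword_spec : Claim_equal_place_word_in_crossword := by
  intro board word _
  show place_word_in_crossword board word = place_word_in_crossword_alt board word
  unfold place_word_in_crossword place_word_in_crossword_alt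
  dsimp only
  rw [List.any_append]
  congr 1
  · exact List.any_congr rfl fun row => pvLineA_eq word.toList (row.map String.toList)
  · exact pvCols_eq word.toList board
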